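-- pv_equiv track=rewrite | github.com/iankvdh/Teoria-de-Algoritmos | GUIAS/REDUCCIONES/ej20.py | verificador_path_selection
-- ===== SOURCE A (Python) =====
-- def verificador_path_selection(G, pedidos, k, caminos):
--     """
--     Verifica si la solución de Path Selection es correcta.
--     """
--     if len(caminos) < k:
--         return False
--
--     # chequeo de que ningún par de caminos seleccionados comparta ningún nodo
--     for i in range(len(caminos)):
--         for j in range(i+1, len(caminos)):
--             if set(caminos[i]).intersection(set(caminos[j])):
--                 return False
--     return True
-- ===== SOURCE B (Python) =====
-- def verificador_path_selection(G, pedidos, k, caminos):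
--     if len(caminos) < k:
--         return False
--     seen = set()
--     for camino in caminos:
--         s = set(camino)
--         if s & seen:
--             return False
--         seen |= s
--     return True
-- ===== Notes on version B (the rewrite author's own statement) =====
-- stated objective: alternative
-- what changed: Replaced the nested all-pairs set-intersection check by a single accumulating pass that keeps one global 'seen' set of nodes and rejects a path as soon as it hits an already-seen node.
import Mathlib
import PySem

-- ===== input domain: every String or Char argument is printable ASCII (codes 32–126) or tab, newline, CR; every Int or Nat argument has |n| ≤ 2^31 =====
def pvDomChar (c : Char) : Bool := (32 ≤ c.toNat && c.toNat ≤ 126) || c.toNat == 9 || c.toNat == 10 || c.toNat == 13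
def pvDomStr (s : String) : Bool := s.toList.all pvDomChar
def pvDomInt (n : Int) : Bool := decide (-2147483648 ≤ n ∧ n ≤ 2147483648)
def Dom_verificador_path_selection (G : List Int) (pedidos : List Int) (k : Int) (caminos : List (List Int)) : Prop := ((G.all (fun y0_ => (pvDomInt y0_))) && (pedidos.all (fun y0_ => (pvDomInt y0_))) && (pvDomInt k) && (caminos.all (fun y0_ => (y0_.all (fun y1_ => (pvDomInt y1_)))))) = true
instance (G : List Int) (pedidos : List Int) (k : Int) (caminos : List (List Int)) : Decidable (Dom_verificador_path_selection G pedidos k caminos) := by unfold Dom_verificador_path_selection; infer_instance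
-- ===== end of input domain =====

-- B replaces A's nested all-pairs intersection check by one accumulating pass with a global 'seen' set (objective: alternative).

-- ===== PORT A =====
-- inner loop: for j in range(i+1, len(caminos)): if set(caminos[i]) & set(caminos[j]): return False
def pvA_inner (caminos : List (List Int)) (ci : List Int) : List Int → Bool
  | [] => false
  | j :: js =>
    if PySem.Set.inter (PySem.Set.ofList ci) (PySem.Set.ofList (PySem.List.pyGetD caminos j [])) ≠ [] then true
    else pvA_inner caminos ci js

-- outer loop: for i in range(len(caminos)): …
def pvA_outer (caminos : List (List Int)) : List Int → Bool
  | [] => false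
  | i :: is =>
    if pvA_inner caminos (PySem.List.pyGetD caminos i []) (PySem.List.pyRange (i + 1) (caminos.length : Int) 1) then true
    else pvA_outer caminos is

def verificador_path_selection (G : List Int) (pedidos : List Int) (k : Int) (caminos : List (List Int)) : Bool :=
  if (caminos.length : Int) < k then false
  else !(pvA_outer caminos (PySem.List.pyRange 0 (caminos.length : Int) 1))

-- ===== PORT B =====
-- for camino in caminos: s = set(camino); if s & seen: return False; seen |= s
def pvB_loop : PySem.Set Int → List (List Int) → Bool
  | _, [] => true
  | seen, c :: rest =>
    let s := PySem.Set.ofList c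
    if PySem.Set.inter s seen ≠ [] then false
    else pvB_loop (PySem.Set.union seen s) rest

def verificador_path_selection_alt (G : List Int) (pedidos : List Int) (k : Int) (caminos : List (List Int)) : Bool :=
  if (caminos.length : Int) < k then false
  else pvB_loop PySem.Set.empty caminos

-- ===== PRECONDITION & SPEC =====
def Spec_verificador_path_selection (G : List Int) (pedidos : List Int) (k : Int) (caminos : List (List Int)) (out : Bool) : Prop := out = verificador_path_selection_alt G pedidos k caminos
instance (G : List Int) (pedidos : List Int) (k : Int) (caminos : List (List Int)) (out : Bool) : Decidable (Spec_verificador_path_selection G pedidos k caminos out) := by unfold Spec_verificador_path_selection; infer_instance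

-- ===== CLAIM (what is proved, stated in full; the proofs are below) =====
def Claim_equal_verificador_path_selection : Prop := ∀ (G : List Int) (pedidos : List Int) (k : Int) (caminos : List (List Int)), Dom_verificador_path_selection G pedidos k caminos → Spec_verificador_path_selection G pedidos k caminos (verificador_path_selection G pedidos k caminos)

-- ===== LEMMAS AND PROOFS =====

def pvDisj (a b : List Int) : Prop := ∀ x ∈ a, x ∉ b

theorem pvDisj_symm {a b : List Int} (h : pvDisj a b) : pvDisj b a := by
  intro x hxb hxa
  exact h x hxa hxb

theorem pv_inter_nil {s t : PySem.Set Int} :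
    PySem.Set.inter s t = [] ↔ ∀ x ∈ s, x ∉ t := by
  rw [List.eq_nil_iff_forall_not_mem]
  constructor
  · intro h x hs ht
    exact h x ((PySem.Set.mem_inter _ _ _).mpr ⟨hs, ht⟩)
  · intro h x hx
    obtain ⟨hs, ht⟩ := (PySem.Set.mem_inter _ _ _).mp hx
    exact h x hs ht

theorem pv_inter_ofList_nil {a b : List Int} :
    PySem.Set.inter (PySem.Set.ofList a) (PySem.Set.ofList b) = [] ↔ pvDisj a b := by
  rw [pv_inter_nil]
  constructor
  · intro h x hxa hxb
    exact h x ((PySem.Set.mem_ofList _ _).mpr hxa) ((PySem.Set.mem_ofList _ _).mpr hxb)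
  · intro h x hxa hxb
    exact h x ((PySem.Set.mem_ofList _ _).mp hxa) ((PySem.Set.mem_ofList _ _).mp hxb)

theorem pvA_inner_false (caminos : List (List Int)) (ci : List Int) :
    ∀ (d j : Nat), j + d = caminos.length →
      (pvA_inner caminos ci (PySem.List.pyRange (j : Int) (caminos.length : Int) 1) = false ↔
        ∀ m : Nat, j ≤ m → m < caminos.length → pvDisj ci (caminos.getD m [])) := by
  intro d
  induction d with
  | zero =>
    intro j hj
    rw [PySem.List.pyRange_one_eq_nil (by omega)]
    simp only [pvA_inner]
    constructor
    · intro _ m hm1 hm2; omega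
    · intro _; trivial
  | succ d ih =>
    intro j hj
    rw [PySem.List.pyRange_one_cons (by exact_mod_cast (by omega : j < caminos.length))]
    simp only [pvA_inner]
    rw [PySem.List.pyGetD_natCast]
    split_ifs with h
    · simp only [false_iff]
      intro hall
      exact h (pv_inter_ofList_nil.mpr (hall j le_rfl (by omega)))
    · have h' : pvDisj ci (caminos.getD j []) := pv_inter_ofList_nil.mp (not_not.mp h)
      have : ((j : Int) + 1) = ((j + 1 : Nat) : Int) := by push_cast; ring
      rw [this, ih (j + 1) (by omega)]
      constructor
      · intro hall m hm1 hm2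
        rcases Nat.eq_or_lt_of_le hm1 with rfl | hlt
        · exact h'
        · exact hall m hlt hm2
      · intro hall m hm1 hm2
        exact hall m (by omega) hm2

theorem pvA_outer_false (caminos : List (List Int)) :
    ∀ (d i : Nat), i + d = caminos.length →
      (pvA_outer caminos (PySem.List.pyRange (i : Int) (caminos.length : Int) 1) = false ↔
        ∀ a b : Nat, i ≤ a → a < b → b < caminos.length →
          pvDisj (caminos.getD a []) (caminos.getD b [])) := by
  intro d
  induction d with
  | zero =>
    intro i hi
    rw [PySem.List.pyRange_one_eq_nil (by omega)]
    simp only [pvA_outer]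
    constructor
    · intro _ a b ha hab hb; omega
    · intro _; trivial
  | succ d ih =>
    intro i hi
    rw [PySem.List.pyRange_one_cons (by exact_mod_cast (by omega : i < caminos.length))]
    simp only [pvA_outer]
    have hcast : ((i : Int) + 1) = ((i + 1 : Nat) : Int) := by push_cast; ring
    rw [PySem.List.pyGetD_natCast, hcast]
    split_ifs with h
    · simp only [false_iff]
      intro hall
      have hfalse : pvA_inner caminos (caminos.getD i []) (PySem.List.pyRange ((i + 1 : Nat) : Int) (caminos.length : Int) 1) = false :=
        (pvA_inner_false caminos _ d (i + 1) (by omega)).mpr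
          (fun m hm1 hm2 => hall i m (Nat.le_refl i) (by omega) hm2)
      rw [hfalse] at h
      exact Bool.false_ne_true h
    · have h : ∀ m : Nat, i + 1 ≤ m → m < caminos.length → pvDisj (caminos.getD i []) (caminos.getD m []) :=
        (pvA_inner_false caminos _ d (i + 1) (by omega)).mp (Bool.eq_false_iff.mpr h)
      rw [ih (i + 1) (by omega)]
      constructor
      · intro hall a b ha hab hb
        rcases Nat.eq_or_lt_of_le ha with rfl | hlt
        · exact h b (by omega) hb
        · exact hall a b hlt hab hb
      · intro hall a b ha hab hb
        exact hall a b (by omega) hab hb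

theorem pvB_loop_true :
    ∀ (l : List (List Int)) (seen : PySem.Set Int),
      pvB_loop seen l = true ↔
        (l.Pairwise (fun a b => pvDisj b a) ∧ ∀ p ∈ l, ∀ x ∈ p, x ∉ seen) := by
  intro l
  induction l with
  | nil => simp [pvB_loop]
  | cons c rest ih =>
    intro seen
    simp only [pvB_loop]
    split_ifs with h
    · simp only [false_iff]
      rintro ⟨-, hall⟩
      apply h
      rw [pv_inter_nil]
      intro x hx hxs
      exact hall c (List.mem_cons_self) x ((PySem.Set.mem_ofList _ _).mp hx) hxs
    · have hdisj : ∀ x ∈ c, x ∉ seen := fun x hx hxs =>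
        pv_inter_nil.mp (not_not.mp h) x ((PySem.Set.mem_ofList _ _).mpr hx) hxs
      rw [ih]
      constructor
      · rintro ⟨hpw, hall⟩
        refine ⟨List.Pairwise.cons ?_ hpw, ?_⟩
        · intro b hb x hxb hxc
          exact hall b hb x hxb ((PySem.Set.mem_union _ _ _).mpr (Or.inr ((PySem.Set.mem_ofList _ _).mpr hxc)))
        · intro p hp x hx hxs
          rcases List.mem_cons.mp hp with rfl | hp'
          · exact hdisj x hx hxs
          · exact hall p hp' x hx ((PySem.Set.mem_union _ _ _).mpr (Or.inl hxs))
      · rintro ⟨hpw, hall⟩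
        rcases List.pairwise_cons.mp hpw with ⟨hhead, htail⟩
        refine ⟨htail, ?_⟩
        intro p hp x hx hxu
        rcases (PySem.Set.mem_union _ _ _).mp hxu with hs | hc
        · exact hall p (List.mem_cons_of_mem _ hp) x hx hs
        · exact hhead p hp x hx ((PySem.Set.mem_ofList _ _).mp hc)

theorem pvA_eq_pairwise (caminos : List (List Int)) :
    (pvA_outer caminos (PySem.List.pyRange 0 (caminos.length : Int) 1) = false ↔
      caminos.Pairwise pvDisj) := by
  have h0 : (0 : Int) = ((0 : Nat) : Int) := rfl
  rw [h0, pvA_outer_false caminos caminos.length 0 (by omega)]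
  rw [List.pairwise_iff_getElem]
  constructor
  · intro hall i j hi hj hij
    have := hall i j (Nat.zero_le _) hij hj
    rwa [List.getD_eq_getElem _ _ hi, List.getD_eq_getElem _ _ hj] at this
  · intro hall a b _ hab hb
    have := hall a b (by omega) hb hab
    rwa [List.getD_eq_getElem _ _ (by omega), List.getD_eq_getElem _ _ hb]

theorem pvB_eq_pairwise (caminos : List (List Int)) :
    (pvB_loop PySem.Set.empty caminos = true ↔ caminos.Pairwise pvDisj) := by
  rw [pvB_loop_true]
  constructor
  · rintro ⟨hpw, -⟩
    exact hpw.imp (fun h => pvDisj_symm h)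
  · intro hpw
    refine ⟨hpw.imp (fun h => pvDisj_symm h), ?_⟩
    intro p _ x _ hx
    exact absurd hx (List.not_mem_nil)

-- ===== VERDICT (by name: the statement is the Claim_ definition above) =====
theorem verificador_path_selection_spec : Claim_equal_verificador_path_selection := by
  intro G pedidos k caminos _
  unfold Spec_verificador_path_selection verificador_path_selection verificador_path_selection_alt
  split_ifs with h
  · rfl
  · by_cases hpw : caminos.Pairwise pvDisj
    · rw [(pvA_eq_pairwise caminos).mpr hpw, (pvB_eq_pairwise caminos).mpr hpw]
      rfl
    · have hA : pvA_outer caminos (PySem.List.pyRange 0 (caminos.length : Int) 1) ≠ false := by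
        intro hc; exact hpw ((pvA_eq_pairwise caminos).mp hc)
      have hB : pvB_loop PySem.Set.empty caminos ≠ true := by
        intro hc; exact hpw ((pvB_eq_pairwise caminos).mp hc)
      cases hval : pvA_outer caminos (PySem.List.pyRange 0 (caminos.length : Int) 1) with
      | false => exact absurd hval hA
      | true => rw [Bool.eq_false_iff.mpr hB]; rfl
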